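-- pv_equiv track=rewrite | github.com/edisanch/extropic-thrml-exploration | 02_ebm_mnist_generation/ebm_model.py | create_2color_blocks
-- ===== SOURCE A (Python) =====
-- from typing import Tuple, List
--
-- def create_2color_blocks(height: int, width: int) -> List[List[int]]:
--     """
--     Create 2-coloring (checkerboard pattern) for 2D grid.
--
--     This is optimal for 4-neighbor interactions. Pixels in the same block
--     have no edges between them, allowing parallel updates.
--
--     Pattern:
--         0 1 0 1 0 1 ...
--         1 0 1 0 1 0 ...
--         0 1 0 1 0 1 ...
--         ...
--
--     Args:
--         height: Grid height
--         width: Grid width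
--
--     Returns:
--         List of 2 blocks, where each block is a list of pixel indices
--     """
--     block_0 = []  # "Even" positions (i+j is even)
--     block_1 = []  # "Odd" positions (i+j is odd)
--
--     for i in range(height):
--         for j in range(width):
--             idx = i * width + j
--             if (i + j) % 2 == 0:
--                 block_0.append(idx)
--             else:
--                 block_1.append(idx)
--
--     return [block_0, block_1]
-- ===== SOURCE B (Python) =====
-- def create_2color_blocks(height: int, width: int):
--     block_0 = []
--     block_1 = []
--     for i in range(height):
--         base = i * width
--         block_0 += [base + j for j in range(i % 2, width, 2)]
--         block_1 += [base + j for j in range((i + 1) % 2, width, 2)]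
--     return [block_0, block_1]
-- ===== Notes on version B (the rewrite author's own statement) =====
-- stated objective: alternative
-- what changed: Instead of scanning every cell and branching on (i+j)%2, B builds each row's two color classes directly as stride-2 index ranges (range(i%2,width,2) and range((i+1)%2,width,2)) and extends the blocks wholesale, eliminating the per-cell parity test and per-cell append.
import Mathlib
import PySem

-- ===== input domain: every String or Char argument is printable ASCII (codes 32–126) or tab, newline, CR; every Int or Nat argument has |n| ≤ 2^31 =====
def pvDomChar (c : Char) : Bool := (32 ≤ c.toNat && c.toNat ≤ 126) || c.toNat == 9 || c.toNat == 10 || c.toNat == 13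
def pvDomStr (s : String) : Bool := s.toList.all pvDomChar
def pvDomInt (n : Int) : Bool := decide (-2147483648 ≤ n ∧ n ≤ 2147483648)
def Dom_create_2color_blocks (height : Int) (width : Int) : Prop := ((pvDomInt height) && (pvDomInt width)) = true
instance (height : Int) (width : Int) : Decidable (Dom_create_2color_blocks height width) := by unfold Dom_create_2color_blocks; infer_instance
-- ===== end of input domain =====

-- B builds each row's two color classes directly as stride-2 index ranges instead of a per-cell parity branch (alternative decomposition, same cost).


-- ===== PORT A =====
def create_2color_blocks (height : Int) (width : Int) : List (List Int) :=
  let p := (PySem.List.pyRange 0 height 1).foldl (fun (s : List Int × List Int) i =>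
    (PySem.List.pyRange 0 width 1).foldl (fun (s : List Int × List Int) j =>
      let idx := i * width + j
      if PySem.Int.mod (i + j) 2 == 0 then (s.1 ++ [idx], s.2) else (s.1, s.2 ++ [idx])) s)
    ([], [])
  [p.1, p.2]

-- ===== PORT B =====
def create_2color_blocks_alt (height : Int) (width : Int) : List (List Int) :=
  let p := (PySem.List.pyRange 0 height 1).foldl (fun (s : List Int × List Int) i =>
      let base := i * width
      (s.1 ++ (PySem.List.pyRange (PySem.Int.mod i 2) width 2).map (fun j => base + j),
       s.2 ++ (PySem.List.pyRange (PySem.Int.mod (i + 1) 2) width 2).map (fun j => base + j)))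
    ([], [])
  [p.1, p.2]

-- ===== PRECONDITION & SPEC =====
def Spec_create_2color_blocks (height : Int) (width : Int) (out : List (List Int)) : Prop := out = create_2color_blocks_alt height width
instance (height : Int) (width : Int) (out : List (List Int)) : Decidable (Spec_create_2color_blocks height width out) := by unfold Spec_create_2color_blocks; infer_instance

-- ===== CLAIM (what is proved, stated in full; the proofs are below) =====
def Claim_equal_create_2color_blocks : Prop := ∀ (height : Int) (width : Int), Dom_create_2color_blocks height width → Spec_create_2color_blocks height width (create_2color_blocks height width)

-- ===== LEMMAS AND PROOFS =====

-- stride-2 range = filter of the unit range by divisibility of (j - s), for s ∈ {0,1}, Nat bound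
lemma filter_dvd_eq_pyRange_two_nat (s : Int) (hs : s = 0 ∨ s = 1) (n : Nat) :
    (PySem.List.pyRange 0 (n : Int) 1).filter (fun j => decide ((2:Int) ∣ (j - s)))
      = PySem.List.pyRange s (n : Int) 2 := by
  induction n with
  | zero =>
      simp only [Nat.cast_zero]
      rw [PySem.List.pyRange_one_eq_nil le_rfl, PySem.List.pyRange_of_pos s 0 (by norm_num)]
      have : ¬ (s < (0:Int)) := by omega
      simp [this]
  | succ n ih =>
      have h1 : ((n + 1 : Nat) : Int) = (n : Int) + 1 := by push_cast; ring
      rw [h1, PySem.List.pyRange_one_succ_right (by exact_mod_cast Nat.zero_le n),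
          List.filter_append, ih,
          PySem.List.pyRange_of_pos s ((n : Int) + 1) (by norm_num),
          PySem.List.pyRange_of_pos s (n : Int) (by norm_num)]
      by_cases hc : (2:Int) ∣ ((n : Int) - s)
      · have hcount : (if s < (n : Int) + 1 then (((n : Int) + 1 - s + 2 - 1) / 2).toNat else 0)
            = (if s < (n : Int) then (((n : Int) - s + 2 - 1) / 2).toNat else 0) + 1 := by
          split_ifs <;> omega
        rw [hcount, List.range_succ, List.map_append]
        congr 1
        simp only [List.filter_cons, List.filter_nil, hc, decide_true, if_true, List.map_cons,
          List.map_nil]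
        have : s + 2 * (((if s < (n : Int) then (((n : Int) - s + 2 - 1) / 2).toNat else 0) : Nat) : Int)
            = (n : Int) := by split_ifs <;> omega
        rw [this]
      · have hcount : (if s < (n : Int) + 1 then (((n : Int) + 1 - s + 2 - 1) / 2).toNat else 0)
            = (if s < (n : Int) then (((n : Int) - s + 2 - 1) / 2).toNat else 0) := by
          split_ifs <;> omega
        rw [hcount]
        simp [List.filter, hc]

-- same, for an arbitrary Int bound
lemma filter_dvd_eq_pyRange_two (s : Int) (hs : s = 0 ∨ s = 1) (w : Int) :
    (PySem.List.pyRange 0 w 1).filter (fun j => decide ((2:Int) ∣ (j - s)))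
      = PySem.List.pyRange s w 2 := by
  rcases le_or_gt w 0 with hw | hw
  · rw [PySem.List.pyRange_one_eq_nil hw, PySem.List.pyRange_of_pos s w (by norm_num)]
    have : ¬ (s < w) := by omega
    simp [this]
  · have : w = ((w.toNat : Nat) : Int) := by omega
    rw [this]
    exact filter_dvd_eq_pyRange_two_nat s hs w.toNat

lemma filter_even_row (i w : Int) :
    (PySem.List.pyRange 0 w 1).filter (fun j => PySem.Int.mod (i + j) 2 == 0)
      = PySem.List.pyRange (PySem.Int.mod i 2) w 2 := by
  rw [← filter_dvd_eq_pyRange_two (PySem.Int.mod i 2) (PySem.Int.mod_two_eq i) w]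
  apply List.filter_congr
  intro j _
  rw [PySem.Int.mod_eq_emod_of_pos (by norm_num), PySem.Int.mod_eq_emod_of_pos (by norm_num),
      Bool.eq_iff_iff]
  simp only [beq_iff_eq, decide_eq_true_eq]
  omega

lemma filter_odd_row (i w : Int) :
    (PySem.List.pyRange 0 w 1).filter (fun j => !(PySem.Int.mod (i + j) 2 == 0))
      = PySem.List.pyRange (PySem.Int.mod (i + 1) 2) w 2 := by
  rw [← filter_dvd_eq_pyRange_two (PySem.Int.mod (i + 1) 2) (PySem.Int.mod_two_eq (i + 1)) w]
  apply List.filter_congr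
  intro j _
  rw [PySem.Int.mod_eq_emod_of_pos (by norm_num), PySem.Int.mod_eq_emod_of_pos (by norm_num),
      Bool.eq_iff_iff]
  simp only [Bool.not_eq_eq_eq_not, Bool.not_true, beq_eq_false_iff_ne, ne_eq,
    decide_eq_true_eq]
  omega

-- A's inner per-row scan equals B's two strided extensions, for any accumulator pair
lemma row_step_eq (width : Int) (s : List Int × List Int) (i : Int) :
    (PySem.List.pyRange 0 width 1).foldl (fun (s : List Int × List Int) j =>
        let idx := i * width + j
        if PySem.Int.mod (i + j) 2 == 0 then (s.1 ++ [idx], s.2) else (s.1, s.2 ++ [idx])) s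
      = (s.1 ++ (PySem.List.pyRange (PySem.Int.mod i 2) width 2).map (fun j => i * width + j),
         s.2 ++ (PySem.List.pyRange (PySem.Int.mod (i + 1) 2) width 2).map (fun j => i * width + j)) := by
  have hstep : (fun (s : List Int × List Int) j =>
        let idx := i * width + j
        if PySem.Int.mod (i + j) 2 == 0 then (s.1 ++ [idx], s.2) else (s.1, s.2 ++ [idx]))
      = fun (s : List Int × List Int) j =>
        (if PySem.Int.mod (i + j) 2 == 0 then s.1 ++ [i * width + j] else s.1,
         if !(PySem.Int.mod (i + j) 2 == 0) then s.2 ++ [i * width + j] else s.2) := by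
    funext s j
    dsimp only
    cases hb : (PySem.Int.mod (i + j) 2 == 0) <;> simp
  rw [hstep,
    PySem.List.foldl_prod_mk
      (f := fun acc j => if PySem.Int.mod (i + j) 2 == 0 then acc ++ [i * width + j] else acc)
      (g := fun acc j => if !(PySem.Int.mod (i + j) 2 == 0) then acc ++ [i * width + j] else acc),
    PySem.List.foldl_append_if (fun j => PySem.Int.mod (i + j) 2 == 0) (fun j => i * width + j),
    PySem.List.foldl_append_if (fun j => !(PySem.Int.mod (i + j) 2 == 0)) (fun j => i * width + j),
    filter_even_row, filter_odd_row]

-- ===== VERDICT (by name: the statement is the Claim_ definition above) =====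
theorem create_2color_blocks_spec : Claim_equal_create_2color_blocks := by
  intro height width _
  unfold Spec_create_2color_blocks create_2color_blocks create_2color_blocks_alt
  have h : (fun (s : List Int × List Int) i =>
        (PySem.List.pyRange 0 width 1).foldl (fun (s : List Int × List Int) j =>
          let idx := i * width + j
          if PySem.Int.mod (i + j) 2 == 0 then (s.1 ++ [idx], s.2) else (s.1, s.2 ++ [idx])) s)
      = fun (s : List Int × List Int) i =>
        let base := i * width
        (s.1 ++ (PySem.List.pyRange (PySem.Int.mod i 2) width 2).map (fun j => base + j),
         s.2 ++ (PySem.List.pyRange (PySem.Int.mod (i + 1) 2) width 2).map (fun j => base + j)) := by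
    funext s i
    exact row_step_eq width s i
  rw [h]
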